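-- pv_equiv track=rewrite | github.com/Pawo0/WDI | zestaw2/zad3.py | czy_palindrom_bin
-- ===== SOURCE A (Python) =====
-- def czy_palindrom_bin(n):
--     n_og = n
--     n_rev = 0
--     while n > 0:
--         cyfra = n % 2
--         n_rev = n_rev * 2 + cyfra
--         n //= 2
--     return n_og == n_rev
-- ===== SOURCE B (Python) =====
-- def czy_palindrom_bin(n):
--     if n < 0:
--         return False
--     s = bin(n)[2:]
--     return s == s[::-1]
-- ===== Notes on version B (the rewrite author's own statement) =====
-- stated objective: simpler
-- what changed: Replaces the arithmetic bit-reversal loop with the binary string representation (bin) compared against its reverse, with an explicit guard for negatives.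
import Mathlib
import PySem

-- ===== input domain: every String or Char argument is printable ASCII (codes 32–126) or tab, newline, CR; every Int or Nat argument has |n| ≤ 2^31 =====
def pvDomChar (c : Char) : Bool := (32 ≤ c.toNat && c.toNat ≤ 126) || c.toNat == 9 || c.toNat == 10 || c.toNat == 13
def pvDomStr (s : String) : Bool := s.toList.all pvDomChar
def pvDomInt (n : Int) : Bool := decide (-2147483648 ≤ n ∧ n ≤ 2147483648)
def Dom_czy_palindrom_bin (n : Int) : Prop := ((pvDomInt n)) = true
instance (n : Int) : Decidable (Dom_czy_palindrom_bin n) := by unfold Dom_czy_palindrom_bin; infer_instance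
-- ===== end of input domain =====

-- B replaces A's arithmetic bit-reversal loop with a binary-string-vs-its-reverse comparison (simpler).


-- ===== PORT A =====
-- the while-loop of A: state (n, n_rev)
def pvLoopA (n r : Int) : Int :=
  if 0 < n then
    pvLoopA (PySem.Int.floordiv n 2) (r * 2 + PySem.Int.mod n 2)
  else r
termination_by n.toNat
decreasing_by
  rename_i h
  rw [PySem.Int.floordiv_eq_ediv_of_pos (by omega)]
  omega

def czy_palindrom_bin (n : Int) : Bool := decide (n = pvLoopA n 0)

-- ===== PORT B =====
-- bin(n)[2:] for n > 0, built by hand (PySem has no bin); exact on positive ints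
def pvBinChars (n : Nat) : List Char :=
  if n = 0 then [] else pvBinChars (n / 2) ++ [if n % 2 = 1 then '1' else '0']

def czy_palindrom_bin_alt (n : Int) : Bool :=
  if n < 0 then false
  else
    -- s = bin(n)[2:]; bin(0)[2:] = "0"
    let s : List Char := if n = 0 then ['0'] else pvBinChars n.toNat
    -- s == s[::-1]  (full slice with step -1 is exactly List.reverse)
    decide (s = s.reverse)

-- ===== PRECONDITION & SPEC =====
def Spec_czy_palindrom_bin (n : Int) (out : Bool) : Prop := out = czy_palindrom_bin_alt n
instance (n : Int) (out : Bool) : Decidable (Spec_czy_palindrom_bin n out) := by unfold Spec_czy_palindrom_bin; infer_instance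

-- ===== CLAIM (what is proved, stated in full; the proofs are below) =====
def Claim_equal_czy_palindrom_bin : Prop := ∀ (n : Int), Dom_czy_palindrom_bin n → Spec_czy_palindrom_bin n (czy_palindrom_bin n)

-- ===== LEMMAS AND PROOFS =====

-- bits of n, least-significant first (proof-side helper)
def pvDigits (n : Nat) : List Nat :=
  if n = 0 then [] else n % 2 :: pvDigits (n / 2)

-- value of a bit list read most-significant first, from accumulator r
def pvVal (r : Nat) (l : List Nat) : Nat := l.foldl (fun a b => a * 2 + b) r

lemma pvDigits_bits : ∀ n, ∀ b ∈ pvDigits n, b < 2 := by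
  intro n
  induction n using Nat.strong_induction_on with
  | _ n ih =>
    rw [pvDigits]
    split
    · simp
    · rename_i h
      intro b hb
      rcases List.mem_cons.mp hb with h1 | h1
      · omega
      · exact ih (n / 2) (Nat.div_lt_self (by omega) (by omega)) b h1

lemma pvVal_init (l : List Nat) : ∀ r, pvVal r l = r * 2 ^ l.length + pvVal 0 l := by
  induction l with
  | nil => intro r; simp [pvVal]
  | cons a l ih =>
    intro r
    show pvVal (r * 2 + a) l = r * 2 ^ (l.length + 1) + pvVal (0 * 2 + a) l
    rw [ih (r * 2 + a), ih (0 * 2 + a)]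
    ring

lemma pvVal_lt (l : List Nat) (h : ∀ b ∈ l, b < 2) : pvVal 0 l < 2 ^ l.length := by
  induction l with
  | nil => simp [pvVal]
  | cons a l ih =>
    show pvVal (0 * 2 + a) l < 2 ^ (l.length + 1)
    rw [pvVal_init]
    have ha : a < 2 := h a (by simp)
    have hlt := ih (fun b hb => h b (by simp [hb]))
    have hp : 0 < 2 ^ l.length := pow_pos (by omega) _
    have h2 : (2:Nat) ^ (l.length + 1) = 2 ^ l.length * 2 := by ring
    nlinarith

lemma pvVal_inj : ∀ (l₁ l₂ : List Nat), l₁.length = l₂.length →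
    (∀ b ∈ l₁, b < 2) → (∀ b ∈ l₂, b < 2) → pvVal 0 l₁ = pvVal 0 l₂ → l₁ = l₂ := by
  intro l₁
  induction l₁ with
  | nil => intro l₂ hl _ _ _; simp at hl; simp [List.length_eq_zero_iff.mp hl.symm]
  | cons a l ih =>
    intro l₂ hl h1 h2 hv
    cases l₂ with
    | nil => simp at hl
    | cons c l' =>
      simp only [List.length_cons] at hl
      have hlen : l.length = l'.length := by omega
      have hv' : a * 2 ^ l'.length + pvVal 0 l = c * 2 ^ l'.length + pvVal 0 l' := by
        have e1 : pvVal 0 (a :: l) = a * 2 ^ l'.length + pvVal 0 l := by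
          show pvVal (0 * 2 + a) l = _
          rw [pvVal_init, hlen]; ring_nf
        have e2 : pvVal 0 (c :: l') = c * 2 ^ l'.length + pvVal 0 l' := by
          show pvVal (0 * 2 + c) l' = _
          rw [pvVal_init]; ring_nf
        rw [← e1, ← e2, hv]
      have hva := pvVal_lt l (fun b hb => h1 b (by simp [hb]))
      have hvc := pvVal_lt l' (fun b hb => h2 b (by simp [hb]))
      have ha : a < 2 := h1 a (by simp)
      have hc : c < 2 := h2 c (by simp)
      rw [hlen] at hva
      have hac : a = c := by interval_cases a <;> interval_cases c <;> omega
      have heq : pvVal 0 l = pvVal 0 l' := by subst hac; omega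
      rw [hac, ih l' hlen (fun b hb => h1 b (by simp [hb])) (fun b hb => h2 b (by simp [hb])) heq]

lemma pvVal_append (l : List Nat) (a r : Nat) :
    pvVal r (l ++ [a]) = pvVal r l * 2 + a := by
  simp [pvVal]

lemma pvVal_rev_digits : ∀ n, pvVal 0 ((pvDigits n).reverse) = n := by
  intro n
  induction n using Nat.strong_induction_on with
  | _ n ih =>
    rw [pvDigits]
    split
    · rename_i h; subst h; simp [pvVal]
    · rename_i h
      rw [List.reverse_cons, pvVal_append, ih (n / 2) (Nat.div_lt_self (by omega) (by omega))]
      omega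

lemma pvLoopA_eq : ∀ (n r : Nat), pvLoopA (n : Int) (r : Int) = ((pvVal r (pvDigits n) : Nat) : Int) := by
  intro n
  induction n using Nat.strong_induction_on with
  | _ n ih =>
    intro r
    rw [pvLoopA, pvDigits]
    by_cases h : n = 0
    · simp [h, pvVal]
    · have hpos : (0:Int) < (n:Int) := by exact_mod_cast Nat.pos_of_ne_zero h
      rw [if_pos hpos, if_neg h]
      rw [show PySem.Int.floordiv (n:Int) 2 = ((n / 2 : Nat) : Int) from by
            exact_mod_cast PySem.Int.floordiv_natCast n 2,
          show PySem.Int.mod (n:Int) 2 = ((n % 2 : Nat) : Int) from by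
            exact_mod_cast PySem.Int.mod_natCast n 2]
      rw [show (r:Int) * 2 + ((n % 2 : Nat) : Int) = ((r * 2 + n % 2 : Nat) : Int) from by push_cast; ring]
      rw [ih (n / 2) (Nat.div_lt_self (by omega) (by omega))]
      simp [pvVal]

lemma pvBinChars_eq : ∀ n, pvBinChars n = ((pvDigits n).reverse).map (fun b => if b = 1 then '1' else '0') := by
  intro n
  induction n using Nat.strong_induction_on with
  | _ n ih =>
    rw [pvBinChars, pvDigits]
    split
    · rename_i h; simp
    · rename_i h
      rw [List.reverse_cons, List.map_append, ih (n / 2) (Nat.div_lt_self (by omega) (by omega))]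
      simp

lemma pvMap_toChar_inj : ∀ (l₁ l₂ : List Nat), (∀ b ∈ l₁, b < 2) → (∀ b ∈ l₂, b < 2) →
    l₁.map (fun b => if b = 1 then '1' else '0') = l₂.map (fun b => if b = 1 then '1' else '0') →
    l₁ = l₂ := by
  intro l₁
  induction l₁ with
  | nil => intro l₂ _ _ h; cases l₂ <;> simp_all
  | cons a l ih =>
    intro l₂ h1 h2 h
    cases l₂ with
    | nil => simp at h
    | cons c l' =>
      simp only [List.map_cons, List.cons.injEq] at h
      have ha : a < 2 := h1 a (by simp)
      have hc : c < 2 := h2 c (by simp)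
      have hac : a = c := by
        rcases h.1 with h'
        interval_cases a <;> interval_cases c <;> simp_all
      rw [hac, ih l' (fun b hb => h1 b (by simp [hb])) (fun b hb => h2 b (by simp [hb])) h.2]

-- ===== VERDICT (by name: the statement is the Claim_ definition above) =====
theorem czy_palindrom_bin_spec : Claim_equal_czy_palindrom_bin := by
  intro n _
  unfold Spec_czy_palindrom_bin czy_palindrom_bin czy_palindrom_bin_alt
  by_cases hneg : n < 0
  · rw [if_pos hneg, pvLoopA, if_neg (by omega)]
    simp; omega
  · rw [if_neg hneg]
    by_cases h0 : n = 0
    · subst h0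
      rw [pvLoopA, if_neg (by omega)]
      simp
    · rw [if_neg h0]
      have hm : n = ((n.toNat : Nat) : Int) := by omega
      set m := n.toNat with hmdef
      have hmpos : m ≠ 0 := by omega
      rw [hm, show (0:Int) = ((0:Nat):Int) from rfl, pvLoopA_eq m 0]
      set d := pvDigits m with hd
      have hbits := pvDigits_bits m
      have hrbits : ∀ b ∈ d.reverse, b < 2 := fun b hb => hbits b (List.mem_reverse.mp hb)
      have hval : pvVal 0 d.reverse = m := pvVal_rev_digits m
      rw [pvBinChars_eq m]
      show decide ((m:Int) = ((pvVal 0 d : Nat) : Int))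
        = decide ((d.reverse.map (fun b => if b = 1 then '1' else '0'))
            = (d.reverse.map (fun b => if b = 1 then '1' else '0')).reverse)
      apply decide_eq_decide.mpr
      constructor
      · intro h1
        have hvv : pvVal 0 d.reverse = pvVal 0 d := by rw [hval]; exact_mod_cast h1
        have hrd : d.reverse = d := pvVal_inj _ _ (by simp) hrbits hbits hvv
        conv_rhs => rw [← List.map_reverse, List.reverse_reverse]
        rw [hrd]
      · intro h2
        rw [← List.map_reverse, List.reverse_reverse] at h2
        have hrd := pvMap_toChar_inj _ _ hrbits hbits h2
        have : pvVal 0 d = m := by rw [hd, ← hrd]; exact hval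
        exact_mod_cast this.symm
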